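-- pv_equiv track=rewrite | github.com/alfrol/advent-of-code | 2021/python/day2/main.py | part2
-- ===== SOURCE A (Python) =====
-- def part2(commands):
--     position = [0, 0]
--     aim = 0
--
--     for cmd, value in commands:
--         if cmd == 'up':
--             aim -= value
--         elif cmd == 'down':
--             aim += value
--         else:
--             position[0] += value
--             position[1] += aim * value
--
--     return position[0] * position[1]
-- ===== SOURCE B (Python) =====
-- def part2(commands):
--     # Pass 1: running aim trajectory (aim in effect after each command).
--     aims = []
--     a = 0
--     for c, v in commands:
--         a += v if c == 'down' else -v if c == 'up' else 0
--         aims.append(a)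
--     # Pass 2: sum the forward distances and the aimed depth contributions.
--     horizontal = sum(v for c, v in commands if c not in ('up', 'down'))
--     depth = sum(v * a for (c, v), a in zip(commands, aims) if c not in ('up', 'down'))
--     return horizontal * depth
-- ===== Notes on version B (the rewrite author's own statement) =====
-- stated objective: alternative
-- what changed: Replaces the single interleaved mutable-state loop with a two-phase computation: first build the running aim trajectory, then sum horizontal and depth in a separate pass over the commands zipped with that trajectory.
import Mathlib
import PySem

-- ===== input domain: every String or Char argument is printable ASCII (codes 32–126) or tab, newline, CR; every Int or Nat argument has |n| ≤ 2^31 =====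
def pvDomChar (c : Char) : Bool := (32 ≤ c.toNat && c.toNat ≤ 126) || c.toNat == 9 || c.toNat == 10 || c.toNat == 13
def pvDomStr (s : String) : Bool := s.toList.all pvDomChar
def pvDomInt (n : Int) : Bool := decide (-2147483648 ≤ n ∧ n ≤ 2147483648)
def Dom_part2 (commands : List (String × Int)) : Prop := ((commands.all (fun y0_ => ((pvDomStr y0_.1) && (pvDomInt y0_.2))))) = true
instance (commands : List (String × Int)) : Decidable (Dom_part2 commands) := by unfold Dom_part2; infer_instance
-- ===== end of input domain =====

-- B replaces A's single interleaved loop by a two-pass decomposition: build the running aim trajectory, then sum horizontal and aimed depth separately (objective: alternative).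
-- ===== PORT A =====
def part2Loop : (Int × Int × Int) → List (String × Int) → (Int × Int × Int)
  | s, [] => s
  | (p0, p1, aim), (cmd, value) :: rest =>
      if cmd == "up" then part2Loop (p0, p1, aim - value) rest
      else if cmd == "down" then part2Loop (p0, p1, aim + value) rest
      else part2Loop (p0 + value, p1 + aim * value, aim) rest

def part2 (commands : List (String × Int)) : Int :=
  let r := part2Loop (0, 0, 0) commands
  r.1 * r.2.1

-- ===== PORT B =====
-- running aim trajectory (pass 1 of Source B)
def aimsB : Int → List (String × Int) → List Int
  | _, [] => []
  | a, (c, v) :: rest =>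
      let a' := a + (if c == "down" then v else if c == "up" then -v else 0)
      a' :: aimsB a' rest

def hfB (s : Int) (cv : String × Int) : Int :=
  if cv.1 == "up" || cv.1 == "down" then s else s + cv.2

def dfB (s : Int) (p : (String × Int) × Int) : Int :=
  if p.1.1 == "up" || p.1.1 == "down" then s else s + p.1.2 * p.2

def part2_alt (commands : List (String × Int)) : Int :=
  let aims := aimsB 0 commands
  let horizontal := commands.foldl hfB 0
  let depth := (commands.zip aims).foldl dfB 0
  horizontal * depth

-- ===== PRECONDITION & SPEC =====
def Spec_part2 (commands : List (String × Int)) (out : Int) : Prop := out = part2_alt commands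
instance (commands : List (String × Int)) (out : Int) : Decidable (Spec_part2 commands out) := by unfold Spec_part2; infer_instance

-- ===== CLAIM (what is proved, stated in full; the proofs are below) =====
def Claim_equal_part2 : Prop := ∀ (commands : List (String × Int)), Dom_part2 commands → Spec_part2 commands (part2 commands)

-- ===== LEMMAS AND PROOFS =====
theorem hfB_shift (cs : List (String × Int)) : ∀ s : Int, cs.foldl hfB s = s + cs.foldl hfB 0 := by
  induction cs with
  | nil => intro s; simp
  | cons c cs ih =>
    intro s
    simp only [List.foldl_cons, hfB]
    split_ifs
    · rw [ih]
    · rw [ih, ih (0 + c.2)]; ring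

theorem dfB_shift (l : List ((String × Int) × Int)) : ∀ s : Int, l.foldl dfB s = s + l.foldl dfB 0 := by
  induction l with
  | nil => intro s; simp
  | cons p l ih =>
    intro s
    simp only [List.foldl_cons, dfB]
    split_ifs
    · rw [ih]
    · rw [ih, ih (0 + p.1.2 * p.2)]; ring

theorem part2Loop_eq (cs : List (String × Int)) : ∀ p0 p1 a : Int,
    part2Loop (p0, p1, a) cs =
      (p0 + cs.foldl hfB 0, p1 + (cs.zip (aimsB a cs)).foldl dfB 0,
        (part2Loop (p0, p1, a) cs).2.2) := by
  induction cs with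
  | nil => intro p0 p1 a; simp [part2Loop]
  | cons cv cs ih =>
    intro p0 p1 a
    obtain ⟨c, v⟩ := cv
    by_cases h1 : c = "up"
    · simp only [part2Loop, aimsB, h1, List.zip_cons_cons, List.foldl_cons, hfB, dfB]
      norm_num
      rw [show (a + if ("up" : String) = "down" then v else -v) = a - v from by
        rw [if_neg (by decide)]; ring]
      exact ih p0 p1 (a - v)
    · by_cases h2 : c = "down"
      · simp only [part2Loop, aimsB, h2, List.zip_cons_cons, List.foldl_cons, hfB, dfB]
        norm_num
        exact ih p0 p1 (a + v)
      · simp only [part2Loop, aimsB, List.zip_cons_cons, List.foldl_cons, hfB, dfB]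
        norm_num [h1, h2]
        rw [ih, hfB_shift cs v, dfB_shift (cs.zip (aimsB a cs)) (v * a)]
        simp only [Prod.mk.injEq]
        exact ⟨by ring, by ring, trivial⟩

-- ===== VERDICT (by name: the statement is the Claim_ definition above) =====
theorem part2_spec : Claim_equal_part2 := by
  intro commands _
  unfold Spec_part2 part2 part2_alt
  rw [part2Loop_eq]
  simp
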